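-- pv_equiv track=rewrite | github.com/MrittikaDutta/python_programs | GFG-POTD/powerfulInteger.py | powerfulInteger
-- ===== SOURCE A (Python) =====
-- def powerfulInteger(intervals, k):
--     # code here
--     events = []
--
--     for start, end in intervals:
--         events.append((start, 1))     # interval starts
--         events.append((end + 1, -1))  # interval ends
--
--     events.sort()
--     count = 0
--     max_powerful = -1
--
--     for i in range(len(events)):
--         pos, delta = events[i]
--         count += delta
--
--         # If the current count is >= k, the current position is in a powerful range
--         if count >= k:
--             # look ahead to the next position (or stay if it's last event)
--             next_pos = events[i+1][0] if i + 1 < len(events) else pos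
--             max_powerful = max(max_powerful, next_pos - 1)
--
--     return max_powerful
-- ===== SOURCE B (Python) =====
-- def powerfulInteger(intervals, k):
--     # Max position covered by >= k intervals: any maximal such position is some
--     # interval's end t (coverage only drops just past an end).  Check each end
--     # directly with a signed sweep-count (#starts <= t minus #ends < t) and keep
--     # the best, -1 if none qualifies.  Requires k >= 1.
--     best = -1
--     for _, t in intervals:
--         if t > best and sum((a <= t) - (b < t) for a, b in intervals) >= k:
--             best = t
--     return best
-- ===== Notes on version B (the rewrite author's own statement) =====
-- stated objective: simpler
-- what changed: A builds a (start,+1)/(end+1,-1) event list, sorts it, and sweeps it with a running count and a look-ahead at the next event; B drops the events and the sort entirely and, using the fact that a maximal position covered by >= k intervals must be some interval's end, directly counts for each end t the signed coverage (#starts <= t minus #ends < t) and keeps the largest qualifying end.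
-- outside the precondition, e.g. on powerfulInteger([(5, 1)], 0): A returns 4, B returns 1; on powerfulInteger([(1, 2)], 0): A returns 2, B returns 2
import Mathlib
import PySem

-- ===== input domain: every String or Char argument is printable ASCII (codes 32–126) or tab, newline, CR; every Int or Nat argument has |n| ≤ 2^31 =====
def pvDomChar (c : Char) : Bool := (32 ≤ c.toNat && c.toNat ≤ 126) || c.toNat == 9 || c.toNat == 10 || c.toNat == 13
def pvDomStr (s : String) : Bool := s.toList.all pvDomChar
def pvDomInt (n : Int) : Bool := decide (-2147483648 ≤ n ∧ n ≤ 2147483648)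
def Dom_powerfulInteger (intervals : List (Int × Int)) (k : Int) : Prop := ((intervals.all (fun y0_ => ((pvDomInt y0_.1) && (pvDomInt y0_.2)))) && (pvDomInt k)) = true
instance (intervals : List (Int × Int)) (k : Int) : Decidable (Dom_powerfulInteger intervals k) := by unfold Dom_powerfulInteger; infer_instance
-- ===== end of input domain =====

-- B replaces A's sort-and-sweep by a direct quadratic check of each interval end
-- (any maximal position covered by ≥ k intervals is an end), which is shorter and
-- plainer; equal on k ≥ 1 (Pre_), no speed claim.

-- ===== PORT A =====
-- next position looked ahead by A's loop: `events[i+1][0] if i + 1 < len(events) else pos`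
def piNextPos (pos : Int) (rest : List (Int × Int)) : Int :=
  match rest with
  | [] => pos
  | (q, _) :: _ => q

-- A's `for i in range(len(events))` loop, carrying (count, max_powerful)
def piLoop (k : Int) (events : List (Int × Int)) (count best : Int) : Int :=
  match events with
  | [] => best
  | (pos, delta) :: rest =>
      let count' := count + delta
      let best' := if k ≤ count' then max best (piNextPos pos rest - 1) else best
      piLoop k rest count' best'

def powerfulInteger (intervals : List (Int × Int)) (k : Int) : Int :=
  let events := intervals.foldl (fun acc p => acc ++ [(p.1, (1 : Int)), (p.2 + 1, (-1 : Int))]) []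
  -- Python's `events.sort()` on int pairs = lexicographic tuple sort
  let sortedEvents := PySem.List.sorted2 events (fun e => e.1) (fun e => e.2)
  piLoop k sortedEvents 0 (-1)

-- ===== PORT B =====
-- Source B's `sum((a <= t) - (b < t) for a, b in intervals)`
def piCov (intervals : List (Int × Int)) (t : Int) : Int :=
  (intervals.map (fun p => (if p.1 ≤ t then (1 : Int) else 0) - (if p.2 < t then (1 : Int) else 0))).sum

def powerfulInteger_alt (intervals : List (Int × Int)) (k : Int) : Int :=
  intervals.foldl (fun best p =>
    if best < p.2 then (if k ≤ piCov intervals p.2 then p.2 else best) else best) (-1)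

-- ===== PRECONDITION & SPEC =====
-- Pre_ requires k ≥ 1: for k ≤ 0 every position is covered by at least k intervals, so no
-- maximum exists and neither program's finite answer is specified (a degenerate query).
def Pre_powerfulInteger (intervals : List (Int × Int)) (k : Int) : Prop := 1 ≤ k
instance (intervals : List (Int × Int)) (k : Int) : Decidable (Pre_powerfulInteger intervals k) := by unfold Pre_powerfulInteger; infer_instance
def pvWitness_powerfulInteger : (List (Int × Int)) × Int := ([(1, 3), (2, 5)], 2)

def Spec_powerfulInteger (intervals : List (Int × Int)) (k : Int) (out : Int) : Prop := out = powerfulInteger_alt intervals k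
instance (intervals : List (Int × Int)) (k : Int) (out : Int) : Decidable (Spec_powerfulInteger intervals k out) := by unfold Spec_powerfulInteger; infer_instance

-- ===== CLAIM (what is proved, stated in full; the proofs are below) =====
def Claim_equal_powerfulInteger : Prop := ∀ (intervals : List (Int × Int)) (k : Int), Dom_powerfulInteger intervals k → Pre_powerfulInteger intervals k → Spec_powerfulInteger intervals k (powerfulInteger intervals k)

-- ===== LEMMAS AND PROOFS =====

-- the unsorted event list A builds, as a flatMap
def evList (intervals : List (Int × Int)) : List (Int × Int) :=
  intervals.flatMap (fun p => [(p.1, (1 : Int)), (p.2 + 1, (-1 : Int))])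

lemma ev_foldl (ivs : List (Int × Int)) :
    ivs.foldl (fun acc p => acc ++ [(p.1, (1 : Int)), (p.2 + 1, (-1 : Int))]) [] = evList ivs := by
  simpa [evList] using PySem.List.foldl_append_eq_flatMap
    (fun p : Int × Int => [(p.1, (1 : Int)), (p.2 + 1, (-1 : Int))]) ivs []

-- total order in which Python sorts the (position, delta) event pairs
def lexLe (a b : Int × Int) : Prop := a.1 < b.1 ∨ (a.1 = b.1 ∧ a.2 ≤ b.2)

lemma lexLe_trans {a b c : Int × Int} (h1 : lexLe a b) (h2 : lexLe b c) : lexLe a c := by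
  unfold lexLe at *; omega

-- the Bool comparison sorted2 uses for key pair (fst, snd)
def evBefore (a b : Int × Int) : Bool :=
  decide (a.1 < b.1) || (!decide (b.1 < a.1) && decide (a.2 < b.2))

lemma evBefore_true {a b : Int × Int} (h : evBefore a b = true) : lexLe a b := by
  unfold evBefore at h; unfold lexLe; simp at h; omega

lemma evBefore_false {a b : Int × Int} (h : evBefore a b = false) : lexLe b a := by
  unfold evBefore at h; unfold lexLe; simp at h; omega

lemma insertBy_pairwise (x : Int × Int) :
    ∀ (l : List (Int × Int)), l.Pairwise lexLe →
      (PySem.List.insertBy evBefore x l).Pairwise lexLe := by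
  intro l
  induction l with
  | nil => intro _; simp [PySem.List.insertBy]
  | cons y ys ih =>
      intro hp
      rw [List.pairwise_cons] at hp
      obtain ⟨hy, hys⟩ := hp
      by_cases hb : evBefore x y = true
      · have hxy : lexLe x y := evBefore_true hb
        simp only [PySem.List.insertBy, hb, if_true]
        refine List.pairwise_cons.2 ⟨?_, List.pairwise_cons.2 ⟨hy, hys⟩⟩
        intro z hz
        rcases List.mem_cons.1 hz with rfl | hz
        · exact hxy
        · exact lexLe_trans hxy (hy z hz)
      · have hb' : evBefore x y = false := by simpa using hb
        have hyx : lexLe x y ∨ lexLe y x := Or.inr (evBefore_false hb')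
        simp only [PySem.List.insertBy, hb', Bool.false_eq_true, if_false]
        refine List.pairwise_cons.2 ⟨?_, ih hys⟩
        intro z hz
        rcases (PySem.List.mem_insertBy evBefore x z ys).1 hz with rfl | hz
        · exact evBefore_false hb'
        · exact hy z hz

lemma sorted2_pairwise (xs : List (Int × Int)) :
    (PySem.List.sorted2 xs (fun e => e.1) (fun e => e.2) false).Pairwise lexLe := by
  unfold PySem.List.sorted2
  simp only
  induction xs using List.reverseRecOn with
  | nil => simp
  | append_singleton ys y ih =>
      rw [List.foldl_append, List.foldl_cons, List.foldl_nil]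
      exact insertBy_pairwise y _ ih

-- sum of the deltas of a list of events
def sumd (L : List (Int × Int)) : Int := (L.map Prod.snd).sum

-- sum of the deltas of the events with position ≤ x
def presum (L : List (Int × Int)) (x : Int) : Int :=
  sumd (L.filter (fun e => decide (e.1 ≤ x)))

@[simp] lemma sumd_nil : sumd [] = 0 := rfl
@[simp] lemma sumd_cons (e : Int × Int) (L : List (Int × Int)) : sumd (e :: L) = e.2 + sumd L := by
  simp [sumd]
@[simp] lemma sumd_append (A B : List (Int × Int)) : sumd (A ++ B) = sumd A + sumd B := by
  simp [sumd]

@[simp] lemma presum_nil (x : Int) : presum [] x = 0 := rfl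
lemma presum_cons (e : Int × Int) (L : List (Int × Int)) (x : Int) :
    presum (e :: L) x = (if e.1 ≤ x then e.2 else 0) + presum L x := by
  by_cases h : e.1 ≤ x <;> simp [presum, h]
@[simp] lemma presum_append (A B : List (Int × Int)) (x : Int) :
    presum (A ++ B) x = presum A x + presum B x := by
  simp [presum]

lemma presum_all_gt {L : List (Int × Int)} {x : Int} (h : ∀ e ∈ L, x < e.1) : presum L x = 0 := by
  have : L.filter (fun e => decide (e.1 ≤ x)) = [] := by
    apply List.filter_eq_nil_iff.2
    intro e he
    simpa using not_le.2 (h e he)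
  simp [presum, this]

lemma presum_all_le {L : List (Int × Int)} {x : Int} (h : ∀ e ∈ L, e.1 ≤ x) : presum L x = sumd L := by
  have : L.filter (fun e => decide (e.1 ≤ x)) = L := by
    apply List.filter_eq_self.2
    intro e he
    simpa using h e he
  simp [presum, this]

lemma presum_perm {L L' : List (Int × Int)} (h : L.Perm L') (x : Int) : presum L x = presum L' x := by
  unfold presum sumd
  exact ((h.filter _).map _).sum_eq

lemma sumd_perm {L L' : List (Int × Int)} (h : L.Perm L') : sumd L = sumd L' := by
  unfold sumd
  exact (h.map _).sum_eq

lemma presum_evList (ivs : List (Int × Int)) (x : Int) : presum (evList ivs) x = piCov ivs x := by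
  induction ivs with
  | nil => simp [evList, piCov]
  | cons p ivs ih =>
      simp only [evList, List.flatMap_cons] at *
      rw [presum_append] at *
      rw [ih]
      simp [piCov, presum_cons, show (p.2 + 1 ≤ x) ↔ p.2 < x from by omega]
      by_cases h1 : p.1 ≤ x <;> by_cases h2 : p.2 < x <;> simp [h1, h2]

lemma sumd_evList (ivs : List (Int × Int)) : sumd (evList ivs) = 0 := by
  induction ivs with
  | nil => rfl
  | cons p ivs ih => simp [evList, List.flatMap_cons] at *; omega

lemma deltas_evList {ivs : List (Int × Int)} {e : Int × Int} (h : e ∈ evList ivs) :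
    e.2 = 1 ∨ e.2 = -1 := by
  unfold evList at h
  rw [List.mem_flatMap] at h
  obtain ⟨p, _, hm⟩ := h
  simp only [List.mem_cons, List.not_mem_nil, or_false] at hm
  rcases hm with rfl | rfl <;> simp

-- values A's loop feeds to `max` (from state count = c), isolating the loop mechanics
def candList (k : Int) : Int → List (Int × Int) → List Int
  | _, [] => []
  | c, (p, d) :: rest =>
      (if k ≤ c + d then [piNextPos p rest - 1] else []) ++ candList k (c + d) rest

-- the qualifying ends B's fold maximises over
def qEnds (intervals : List (Int × Int)) (k : Int) : List Int :=
  (intervals.map Prod.snd).filter (fun t => decide (k ≤ piCov intervals t))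

-- A's loop is foldl max over its fired candidate values
lemma loop_eq (k : Int) : ∀ (E : List (Int × Int)) (c best : Int),
    piLoop k E c best = (candList k c E).foldl max best := by
  intro E
  induction E with
  | nil => intro c best; rfl
  | cons e rest ih =>
      intro c best
      obtain ⟨p, d⟩ := e
      by_cases h : k ≤ c + d <;>
        simp [piLoop, candList, h, ih]

lemma foldl_max_le {L : List Int} {a b : Int} (hab : a ≤ b) (h : ∀ x ∈ L, x ≤ b) :
    L.foldl max a ≤ b := by
  induction L generalizing a with
  | nil => simpa
  | cons x xs ih =>
      rw [List.foldl_cons]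
      exact ih (max_le hab (h x (by simp))) (fun y hy => h y (by simp [hy]))

-- candidate fired at a designated event of the list
lemma fire_mem (k : Int) : ∀ (X : List (Int × Int)) (c q d : Int) (Y : List (Int × Int)),
    k ≤ c + sumd X + d → (piNextPos q Y - 1) ∈ candList k c (X ++ (q, d) :: Y) := by
  intro X
  induction X with
  | nil =>
      intro c q d Y h
      simp only [List.nil_append, candList]
      have : k ≤ c + d := by simpa using h
      simp [this]
  | cons e X ih =>
      intro c q d Y h
      obtain ⟨p, dd⟩ := e
      simp only [List.cons_append, candList]
      refine List.mem_append_right _ ?_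
      apply ih
      simp at h ⊢
      omega

-- every fired candidate arises at a designated event
lemma cand_inv (k : Int) : ∀ (E : List (Int × Int)) (c v : Int), v ∈ candList k c E →
    ∃ X q d Y, E = X ++ (q, d) :: Y ∧ k ≤ c + sumd X + d ∧ v = piNextPos q Y - 1 := by
  intro E
  induction E with
  | nil => intro c v h; simp [candList] at h
  | cons e rest ih =>
      intro c v h
      obtain ⟨p, d⟩ := e
      simp only [candList] at h
      rcases List.mem_append.1 h with h | h
      · by_cases hk : k ≤ c + d
        · simp [hk] at h
          exact ⟨[], p, d, rest, by simp, by simpa using hk, h⟩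
        · simp [hk] at h
      · obtain ⟨X, q, dd, Y, hE, hk, hv⟩ := ih (c + d) v h
        exact ⟨(p, d) :: X, q, dd, Y, by simp [hE], by simp; omega, hv⟩

-- split a sorted list at the last event with position ≤ t
lemma split_at {t : Int} : ∀ (S : List (Int × Int)), S.Pairwise lexLe →
    (∃ e ∈ S, e.1 ≤ t) →
    ∃ X q d Y, S = X ++ (q, d) :: Y ∧ (∀ e ∈ X ++ [(q, d)], e.1 ≤ t) ∧ (∀ e ∈ Y, t < e.1) := by
  intro S
  induction S with
  | nil => intro _ h; simp at h
  | cons e rest ih =>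
      intro hp hex
      rw [List.pairwise_cons] at hp
      obtain ⟨he, hrest⟩ := hp
      by_cases hx : ∃ e ∈ rest, e.1 ≤ t
      · obtain ⟨X, q, d, Y, hE, hX, hY⟩ := ih hrest hx
        refine ⟨e :: X, q, d, Y, by simp [hE], ?_, hY⟩
        intro f hf
        rcases List.mem_cons.1 hf with rfl | hf
        · obtain ⟨w, hw, hwt⟩ := hx
          rcases he w hw with h | h
          · omega
          · omega
        · exact hX f hf
      · obtain ⟨p, d⟩ := e
        refine ⟨[], p, d, rest, rfl, ?_, ?_⟩
        · intro f hf
          simp at hf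
          subst hf
          rcases hex with ⟨w, hw, hwt⟩
          rcases List.mem_cons.1 hw with rfl | hw
          · exact hwt
          · exact absurd ⟨w, hw, hwt⟩ hx
        · intro f hf
          by_contra hc
          exact hx ⟨f, hf, by omega⟩

lemma sumd_le_filter {P : Int × Int → Bool} : ∀ (L : List (Int × Int)),
    (∀ e ∈ L, P e = false → e.2 ≤ 0) → sumd L ≤ sumd (L.filter P) := by
  intro L
  induction L with
  | nil => simp
  | cons e L ih =>
      intro h
      by_cases hp : P e = true
      · rw [List.filter_cons_of_pos hp, sumd_cons, sumd_cons]
        have := ih (fun f hf => h f (by simp [hf]))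
        omega
      · rw [List.filter_cons_of_neg (by simpa using hp), sumd_cons]
        have h1 := h e (by simp) (by simpa using hp)
        have := ih (fun f hf => h f (by simp [hf]))
        omega

-- from a fired mid-group candidate, walk right to a position where the presum itself is ≥ k
lemma push (k : Int) : ∀ (Y X : List (Int × Int)) (q d : Int),
    (X ++ (q, d) :: Y).Pairwise lexLe →
    (∀ e ∈ X ++ (q, d) :: Y, e.2 = 1 ∨ e.2 = -1) →
    sumd (X ++ (q, d) :: Y) = 0 → 1 ≤ k → k ≤ sumd X + d →
    ∃ x : Int, k ≤ presum (X ++ (q, d) :: Y) x ∧ piNextPos q Y - 1 ≤ x := by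
  intro Y
  induction Y with
  | nil =>
      intro X q d _ _ hsum hk hge
      exfalso
      simp at hsum
      omega
  | cons re Y' ih =>
      intro X q d hp hdel hsum hk hge
      obtain ⟨r, e⟩ := re
      obtain ⟨hX, hrest, hcross⟩ := List.pairwise_append.1 hp
      rw [List.pairwise_cons] at hrest
      obtain ⟨hq, hrest⟩ := hrest
      rw [List.pairwise_cons] at hrest
      obtain ⟨hr, _⟩ := hrest
      have hqr : lexLe (q, d) (r, e) := hq _ (by simp)
      simp only [lexLe] at hqr
      by_cases hlt : q < r
      · -- the look-ahead jumps to a strictly larger position r: x = r - 1 works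
        refine ⟨r - 1, ?_, by simp [piNextPos]⟩
        have h2 : presum X (r - 1) = sumd X := by
          apply presum_all_le
          intro f hf
          have h := hcross f hf (q, d) (by simp)
          simp only [lexLe] at h
          omega
        have h3 : presum Y' (r - 1) = 0 := by
          apply presum_all_gt
          intro f hf
          have h := hr f hf
          simp only [lexLe] at h
          omega
        rw [presum_append, presum_cons, presum_cons, h2, h3]
        simp [show q ≤ r - 1 from by omega, show ¬ (r ≤ r - 1) from by omega]
        omega
      · have hq_eq : q = r ∧ d ≤ e := by omega
        obtain ⟨hqr', hde⟩ := hq_eq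
        subst hqr'
        have hassoc : X ++ (q, d) :: (q, e) :: Y' = (X ++ [(q, d)]) ++ (q, e) :: Y' := by simp
        rcases hdel (q, e) (List.mem_append_right _ (by simp)) with he1 | he1
        · -- same position, next delta +1: push further right
          rw [hassoc] at hp hdel hsum ⊢
          obtain ⟨x, hx1, hx2⟩ := ih (X ++ [(q, d)]) q e hp hdel hsum hk
            (by simp only [sumd_append, sumd_cons, sumd_nil]; omega)
          refine ⟨x, hx1, ?_⟩
          have hnx : q ≤ piNextPos q Y' := by
            cases Y' with
            | nil => simp [piNextPos]
            | cons g Y'' =>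
                have h := hr g (by simp)
                obtain ⟨g1, g2⟩ := g
                simp only [lexLe] at h
                show q ≤ g1
                omega
          show q - 1 ≤ x
          omega
        · -- same position, next delta -1: every same-position event left of it is a -1
          have hd1 : d = -1 := by
            rcases hdel (q, d) (List.mem_append_right _ (by simp)) with h | h
            · exfalso; omega
            · exact h
          refine ⟨q - 1, ?_, by simp [piNextPos]⟩
          have h2 : presum ((q, e) :: Y') (q - 1) = 0 := by
            apply presum_all_gt
            intro f hf
            rcases List.mem_cons.1 hf with rfl | hf
            · simp
            · have h := hr f hf
              simp only [lexLe] at h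
              omega
          have h3 : sumd (X ++ [(q, d)]) ≤ presum (X ++ [(q, d)]) (q - 1) := by
            unfold presum
            apply sumd_le_filter
            intro f hf hP
            simp only [decide_eq_false_iff_not, not_le] at hP
            rcases List.mem_append.1 hf with hf | hf
            · have h := hcross f hf (q, e) (by simp)
              simp only [lexLe] at h
              omega
            · simp at hf
              subst hf
              simp
              omega
          have h4 : sumd (X ++ [(q, d)]) = sumd X + d := by simp
          rw [hassoc, presum_append, h2]
          omega

-- any covered position is dominated by a covered interval end
lemma exists_end (ivs : List (Int × Int)) (k : Int) :
    ∀ (n : Nat) (x : Int), (∀ p ∈ ivs, p.1 ≤ x + n ∧ p.2 + 1 ≤ x + n) → 1 ≤ k →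
      k ≤ piCov ivs x → ∃ t ∈ ivs.map Prod.snd, x ≤ t ∧ k ≤ piCov ivs t := by
  intro n
  induction n with
  | zero =>
      intro x hb hk hc
      exfalso
      have hz : piCov ivs x = 0 := by
        unfold piCov
        apply List.sum_eq_zero
        intro y hy
        rw [List.mem_map] at hy
        obtain ⟨p, hp, rfl⟩ := hy
        have hbp := hb p hp
        have h1 : p.1 ≤ x := by omega
        have h2 : p.2 < x := by omega
        simp [h1, h2]
      omega
  | succ n ih =>
      intro x hb hk hc
      by_cases hend : ∃ p ∈ ivs, p.2 = x
      · obtain ⟨p, hp, hpx⟩ := hend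
        exact ⟨x, List.mem_map.2 ⟨p, hp, hpx⟩, le_refl x, hc⟩
      · have hmono : piCov ivs x ≤ piCov ivs (x + 1) := by
          unfold piCov
          apply List.sum_le_sum
          intro p hp
          have hne : p.2 ≠ x := fun h => hend ⟨p, hp, h⟩
          split_ifs <;> omega
        obtain ⟨t, ht, hxt, hct⟩ := ih (x + 1)
          (by intro p hp; have := hb p hp; omega) hk (le_trans hc hmono)
        exact ⟨t, ht, by omega, hct⟩

lemma exists_bound (ivs : List (Int × Int)) (x : Int) :
    ∃ n : Nat, ∀ p ∈ ivs, p.1 ≤ x + n ∧ p.2 + 1 ≤ x + n := by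
  induction ivs with
  | nil => exact ⟨0, by simp⟩
  | cons p ivs ih =>
      obtain ⟨n, hn⟩ := ih
      refine ⟨n + (p.1 - x).toNat + (p.2 + 1 - x).toNat, ?_⟩
      intro q hq
      have h1 := Int.self_le_toNat (q.1 - x)
      have h2 := Int.self_le_toNat (q.2 + 1 - x)
      rcases List.mem_cons.1 hq with rfl | hq
      · push_cast
        omega
      · have := hn q hq
        push_cast
        omega

-- B's fold is foldl max over the qualifying ends
lemma alt_eq (ivs : List (Int × Int)) (k : Int) :
    powerfulInteger_alt ivs k = (qEnds ivs k).foldl max (-1) := by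
  have key : ∀ (l : List (Int × Int)) (best : Int),
      l.foldl (fun best p => if best < p.2 then (if k ≤ piCov ivs p.2 then p.2 else best) else best) best
        = ((l.map Prod.snd).filter (fun t => decide (k ≤ piCov ivs t))).foldl max best := by
    intro l
    induction l with
    | nil => intro best; rfl
    | cons p l ih =>
        intro best
        rw [List.foldl_cons, List.map_cons]
        by_cases hc : k ≤ piCov ivs p.2
        · rw [List.filter_cons_of_pos (by simpa using hc), List.foldl_cons, ih]
          congr 1
          split_ifs <;> omega
        · rw [List.filter_cons_of_neg (by simpa using hc), ih]
          congr 1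
          rw [if_neg hc, ite_self]
  exact key ivs (-1)

lemma qEnds_le_cand (ivs : List (Int × Int)) (k : Int)
    (S : List (Int × Int)) (hperm : S.Perm (evList ivs)) (hpair : S.Pairwise lexLe)
    (hk : 1 ≤ k) :
    ∀ t ∈ qEnds ivs k, t ∈ candList k 0 S := by
  intro t ht
  rw [qEnds, List.mem_filter] at ht
  obtain ⟨htm, hcov⟩ := ht
  have hcov' : k ≤ piCov ivs t := by simpa using hcov
  have hpre : presum S t = piCov ivs t := (presum_perm hperm t).trans (presum_evList ivs t)
  obtain ⟨p, hp, hpt⟩ := List.mem_map.1 htm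
  have hmemS : (t + 1, (-1 : Int)) ∈ S := by
    rw [hperm.mem_iff]
    unfold evList
    rw [List.mem_flatMap]
    exact ⟨p, hp, by simp [hpt]⟩
  have hex : ∃ e ∈ S, e.1 ≤ t := by
    by_contra hno
    simp only [not_exists, not_and, not_le] at hno
    have : presum S t = 0 := presum_all_gt (fun e he => by have := hno e he; omega)
    omega
  obtain ⟨X, q, d, Y, hE, hXle, hYgt⟩ := split_at S hpair hex
  -- the count after the last event with position ≤ t is exactly presum S t ≥ k
  have hsum : sumd X + d = presum S t := by
    have h1 : S = (X ++ [(q, d)]) ++ Y := by simp [hE]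
    rw [h1, presum_append]
    have h2 : presum (X ++ [(q, d)]) t = sumd (X ++ [(q, d)]) :=
      presum_all_le hXle
    have h3 : presum Y t = 0 := presum_all_gt hYgt
    rw [h2, h3]
    simp
  -- the next event sits at position t + 1
  have hY : piNextPos q Y = t + 1 := by
    have hmemY : (t + 1, (-1 : Int)) ∈ Y := by
      rw [hE] at hmemS
      rcases List.mem_append.1 hmemS with h | h
      · exact absurd (hXle _ (List.mem_append_left _ h)) (by simp)
      · rcases List.mem_cons.1 h with h | h
        · exfalso
          have := hXle (q, d) (List.mem_append_right _ (by simp))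
          rw [← h] at this
          simp at this
        · exact h
    cases Y with
    | nil => simp at hmemY
    | cons g Y' =>
        obtain ⟨g1, g2⟩ := g
        show g1 = t + 1
        have hg1 : t < g1 := by
          have := hYgt (g1, g2) (by simp)
          simpa using this
        rcases List.mem_cons.1 hmemY with h | h
        · simpa using congrArg Prod.fst h.symm
        · have hpY : ((g1, g2) :: Y').Pairwise lexLe := by
            rw [hE] at hpair
            exact ((List.pairwise_append.1 hpair).2.1).tail
          have := (List.pairwise_cons.1 hpY).1 _ h
          simp only [lexLe] at this
          omega
  have := fire_mem k X 0 q d Y (by omega)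
  rw [hY] at this
  simpa [hE] using this

lemma cand_bounded (ivs : List (Int × Int)) (k : Int)
    (S : List (Int × Int)) (hperm : S.Perm (evList ivs)) (hpair : S.Pairwise lexLe)
    (hk : 1 ≤ k) :
    ∀ v ∈ candList k 0 S, ∃ t ∈ qEnds ivs k, v ≤ t := by
  intro v hv
  obtain ⟨X, q, d, Y, hE, hkc, hveq⟩ := cand_inv k S 0 v hv
  have hδ : ∀ e ∈ X ++ (q, d) :: Y, e.2 = 1 ∨ e.2 = -1 := by
    intro e he
    exact deltas_evList (hperm.subset (hE ▸ he))
  have hsum : sumd (X ++ (q, d) :: Y) = 0 := by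
    rw [← hE, sumd_perm hperm, sumd_evList]
  obtain ⟨x, hx1, hx2⟩ := push k Y X q d (hE ▸ hpair) hδ hsum hk (by omega)
  have hxcov : k ≤ piCov ivs x := by
    rw [← presum_evList, ← presum_perm hperm x, hE]
    exact hx1
  obtain ⟨nb, hnb⟩ := exists_bound ivs x
  obtain ⟨t, htm, hxt, hct⟩ := exists_end ivs k nb x hnb hk hxcov
  refine ⟨t, ?_, by omega⟩
  rw [qEnds, List.mem_filter]
  exact ⟨htm, by simpa using hct⟩

theorem powerfulInteger_spec : Claim_equal_powerfulInteger := by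
  unfold Claim_equal_powerfulInteger
  intro ivs k _ hk
  unfold Pre_powerfulInteger at hk
  unfold Spec_powerfulInteger
  have hA : powerfulInteger ivs k
      = piLoop k (PySem.List.sorted2 (evList ivs) (fun e => e.1) (fun e => e.2)) 0 (-1) := by
    unfold powerfulInteger
    rw [ev_foldl]
  rw [hA]
  obtain ⟨S, hS⟩ : ∃ S, PySem.List.sorted2 (evList ivs) (fun e => e.1) (fun e => e.2) = S :=
    ⟨_, rfl⟩
  rw [hS]
  have hperm : S.Perm (evList ivs) := hS ▸ PySem.List.sorted2_perm (evList ivs) _ _ false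
  have hpair : S.Pairwise lexLe := hS ▸ sorted2_pairwise (evList ivs)
  rw [loop_eq, alt_eq]
  apply le_antisymm
  · apply foldl_max_le (PySem.List.le_foldl_max (qEnds ivs k) (-1)).1
    intro v hv
    obtain ⟨t, ht, hvt⟩ := cand_bounded ivs k S hperm hpair hk v hv
    exact le_trans hvt ((PySem.List.le_foldl_max (qEnds ivs k) (-1)).2 t ht)
  · apply foldl_max_le (PySem.List.le_foldl_max (candList k 0 S) (-1)).1
    intro t ht
    exact (PySem.List.le_foldl_max (candList k 0 S) (-1)).2 t
      (qEnds_le_cand ivs k S hperm hpair hk t ht)
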